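-- pv_equiv track=rewrite | github.com/bnna-project/bnna | sim/proc_unit/test_pe.py | xnor_popcount
-- ===== SOURCE A (Python) =====
-- def xnor_popcount(data, weights):
--     # xnor
--     xnor = ~(data ^ weights)
--     xnor_str = format(xnor & 0xffffffffffffffff, '064b')
--
--     # popcount
--     bit_cnt = 0
--     for i in range(len(xnor_str)):
--         if(xnor_str[i] == "1"):
--             bit_cnt += 1
--     #2P-N
--     double_p = bit_cnt << 1
--     double_pn = double_p - len(xnor_str)
--
--     return double_pn
-- ===== SOURCE B (Python) =====
-- def xnor_popcount(data, weights):
--     # xnor, masked to 64 bits, kept as an integer (no binary string)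
--     x = ~(data ^ weights) & 0xffffffffffffffff
--     # Brian Kernighan popcount: one iteration per set bit
--     p = 0
--     while x:
--         x &= x - 1
--         p += 1
--     # 2P - N with N = 64
--     return 2 * p - 64
-- ===== Notes on version B (the rewrite author's own statement) =====
-- stated objective: alternative
-- what changed: Replaces the 64-character binary-string formatting and per-character scan with an integer-only Brian Kernighan popcount loop (x &= x-1) that iterates once per set bit, returning 2*P-64 directly.
import Mathlib
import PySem

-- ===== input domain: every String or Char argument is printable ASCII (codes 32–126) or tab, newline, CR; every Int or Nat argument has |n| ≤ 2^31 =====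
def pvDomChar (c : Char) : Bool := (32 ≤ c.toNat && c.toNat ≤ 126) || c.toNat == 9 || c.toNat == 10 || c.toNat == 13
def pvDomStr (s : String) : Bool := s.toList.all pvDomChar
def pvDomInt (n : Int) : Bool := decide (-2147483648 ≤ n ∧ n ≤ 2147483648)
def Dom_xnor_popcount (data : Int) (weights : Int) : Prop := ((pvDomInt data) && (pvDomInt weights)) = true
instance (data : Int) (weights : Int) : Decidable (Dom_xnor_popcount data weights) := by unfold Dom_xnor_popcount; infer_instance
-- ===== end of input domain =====

-- B replaces A's 64-char binary-string formatting + per-character scan by an integer-only Kernighan popcount loop (alternative algorithm; same result 2P-64).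


-- ===== PORT A =====
-- `~n` is Lean's Int.not, `^` is PySem.Int.bxor, `&` is PySem.Int.band (all Python-exact).
-- format(v, '064b') for the nonneg masked value = binary digits (Nat.toDigits 2, as PySem.Int.toBinChars
-- reduces to on nonnegative input) left-padded with '0' to width 64.
def xnor_popcount (data : Int) (weights : Int) : Int :=
  let xnor : Int := Int.not (PySem.Int.bxor data weights)
  let masked : Int := PySem.Int.band xnor 0xffffffffffffffff
  let digits : List Char := Nat.toDigits 2 masked.toNat
  let xnor_str : List Char := List.replicate (64 - digits.length) '0' ++ digits
  let bit_cnt : Int := xnor_str.foldl (fun c ch => if ch == '1' then c + 1 else c) 0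
  let double_p : Int := bit_cnt <<< (1 : Nat)
  double_p - (xnor_str.length : Int)

-- ===== PORT B =====
-- Kernighan loop: while x: x &= x - 1; p += 1   (x is the nonneg masked value, kept as Nat)
def pvKern (x : Nat) : Nat :=
  if h : x = 0 then 0 else pvKern (x &&& (x - 1)) + 1
termination_by x
decreasing_by
  have h1 : x &&& (x - 1) ≤ x - 1 := Nat.and_le_right
  omega

def xnor_popcount_alt (data : Int) (weights : Int) : Int :=
  let x : Int := PySem.Int.band (Int.not (PySem.Int.bxor data weights)) 0xffffffffffffffff
  2 * ((pvKern x.toNat : Nat) : Int) - 64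

-- ===== PRECONDITION & SPEC =====
def Spec_xnor_popcount (data : Int) (weights : Int) (out : Int) : Prop := out = xnor_popcount_alt data weights
instance (data : Int) (weights : Int) (out : Int) : Decidable (Spec_xnor_popcount data weights out) := by unfold Spec_xnor_popcount; infer_instance

-- ===== CLAIM (what is proved, stated in full; the proofs are below) =====
def Claim_equal_xnor_popcount : Prop := ∀ (data : Int) (weights : Int), Dom_xnor_popcount data weights → Spec_xnor_popcount data weights (xnor_popcount data weights)

-- ===== LEMMAS AND PROOFS =====

-- bitCount of a Nat, the common yardstick both counts are proved equal to
def pvBC (n : Nat) : Nat := PySem.Int.bitCount (n : Int)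

theorem pvBC_two_mul (q : Nat) : pvBC (2 * q) = pvBC q := by
  rcases Nat.eq_zero_or_pos q with h | h
  · subst h; rfl
  · unfold pvBC
    rw [PySem.Int.bitCount_natCast (by omega : 0 < 2 * q)]
    have : 2 * q / 2 = q := by omega
    simp [this, Nat.mul_mod_right]

theorem pvBC_two_mul_add_one (q : Nat) : pvBC (2 * q + 1) = pvBC q + 1 := by
  unfold pvBC
  rw [PySem.Int.bitCount_natCast (by omega : 0 < 2 * q + 1)]
  have h1 : (2 * q + 1) / 2 = q := by omega
  have h2 : (2 * q + 1) % 2 = 1 := by omega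
  rw [h1, h2]; omega

theorem and_pred_odd (q : Nat) : (2 * q + 1) &&& (2 * q) = 2 * q := by
  apply Nat.eq_of_testBit_eq; intro i
  cases i with
  | zero => simp [Nat.testBit_zero, Nat.mul_mod_right]
  | succ j =>
    rw [Nat.testBit_and, Nat.testBit_succ, Nat.testBit_succ]
    have h1 : (2 * q + 1) / 2 = q := by omega
    have h2 : (2 * q) / 2 = q := by omega
    rw [h1, h2, Bool.and_self]

theorem and_pred_even (q : Nat) (h : 0 < q) : (2 * q) &&& (2 * q - 1) = 2 * (q &&& (q - 1)) := by
  apply Nat.eq_of_testBit_eq; intro i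
  cases i with
  | zero => simp [Nat.testBit_zero, Nat.mul_mod_right]
  | succ j =>
    rw [Nat.testBit_and, Nat.testBit_succ, Nat.testBit_succ, Nat.testBit_succ]
    have h1 : (2 * q) / 2 = q := by omega
    have h2 : (2 * q - 1) / 2 = q - 1 := by omega
    have h3 : (2 * (q &&& (q - 1))) / 2 = q &&& (q - 1) := by omega
    rw [h1, h2, h3, Nat.testBit_and]

theorem pvBC_and_pred (n : Nat) (hn : 0 < n) : pvBC (n &&& (n - 1)) + 1 = pvBC n := by
  induction n using Nat.strong_induction_on with
  | _ n ih =>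
    rcases Nat.even_or_odd n with ⟨q, hq⟩ | ⟨q, hq⟩
    · -- n = 2q, q ≥ 1
      have hq2 : n = 2 * q := by omega
      have hqpos : 0 < q := by omega
      subst hq2
      rw [show 2 * q - 1 = 2 * q - 1 from rfl, and_pred_even q hqpos, pvBC_two_mul, pvBC_two_mul]
      exact ih q (by omega) hqpos
    · -- n = 2q + 1
      have hq2 : n = 2 * q + 1 := by omega
      subst hq2
      have : 2 * q + 1 - 1 = 2 * q := by omega
      rw [this, and_pred_odd, pvBC_two_mul, pvBC_two_mul_add_one]

theorem pvKern_eq_pvBC (n : Nat) : pvKern n = pvBC n := by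
  induction n using Nat.strong_induction_on with
  | _ n ih =>
    rcases Nat.eq_zero_or_pos n with h | h
    · subst h; rw [pvKern]; rfl
    · rw [pvKern]
      have hlt : n &&& (n - 1) < n := by
        have := Nat.and_le_right (n := n) (m := n - 1)
        omega
      rw [dif_neg (by omega), ih _ hlt, pvBC_and_pred n h]

-- counting '1' characters in Nat.toDigitsCore output
theorem tdc_count (f : Nat) : ∀ (n : Nat) (acc : List Char), n < f →
    (Nat.toDigitsCore 2 f n acc).countP (· == '1') = pvBC n + acc.countP (· == '1') := by
  induction f with
  | zero => intro n acc h; omega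
  | succ f ih =>
    intro n acc h
    simp only [Nat.toDigitsCore]
    by_cases h2 : n / 2 = 0
    · have hn1 : n ≤ 1 := by omega
      rw [h2, if_pos rfl]
      interval_cases n
      · have : pvBC 0 = 0 := by decide
        simp [Nat.digitChar, this]
      · have : pvBC 1 = 1 := by decide
        simp [Nat.digitChar, this]
        omega
    · rw [if_neg h2]
      have hlt : n / 2 < f := by omega
      rw [ih (n / 2) _ hlt]
      have hpos : 0 < n := by omega
      have hbc : pvBC n = n % 2 + pvBC (n / 2) := PySem.Int.bitCount_natCast hpos
      rw [hbc]
      rcases Nat.mod_two_eq_zero_or_one n with hm | hm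
      · rw [hm]; simp [Nat.digitChar]
      · rw [hm]; simp [Nat.digitChar]; omega

theorem toDigits_count (n : Nat) : (Nat.toDigits 2 n).countP (· == '1') = pvBC n := by
  unfold Nat.toDigits
  rw [tdc_count (n + 1) n [] (by omega)]
  simp

-- bounds of the mask
theorem band_mask_bounds (a b : Int) (hb : 0 ≤ b) :
    0 ≤ PySem.Int.band a b ∧ PySem.Int.band a b ≤ b := by
  unfold PySem.Int.band
  split_ifs with h1
  · have := Nat.and_le_right (n := a.toNat) (m := b.toNat)
    omega
  · omega

theorem xnor_popcount_core (m : Nat) (hm : m < 2 ^ 64) :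
    (List.foldl (fun c ch => if ch == '1' then c + 1 else c) (0 : Int)
        (List.replicate (64 - (Nat.toDigits 2 m).length) '0' ++ Nat.toDigits 2 m)) <<< (1 : Nat)
      - ((List.replicate (64 - (Nat.toDigits 2 m).length) '0' ++ Nat.toDigits 2 m).length : Int)
    = 2 * ((pvKern m : Nat) : Int) - 64 := by
  have hlen : (Nat.toDigits 2 m).length ≤ 64 :=
    Nat.toDigits_length 2 m 64 (by norm_num) hm
  rw [PySem.List.foldl_count_if (· == '1')]
  rw [List.countP_append]
  have hrep : (List.replicate (64 - (Nat.toDigits 2 m).length) '0').countP (· == '1') = 0 := by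
    simp [List.countP_replicate]
  rw [hrep, toDigits_count m, pvKern_eq_pvBC m]
  have hlen2 : ((List.replicate (64 - (Nat.toDigits 2 m).length) '0' ++
      Nat.toDigits 2 m).length : Int) = 64 := by
    simp [List.length_append, List.length_replicate]
    omega
  rw [hlen2]
  rw [Int.shiftLeft_eq']
  push_cast
  ring

theorem xnor_popcount_eq (data weights : Int) :
    xnor_popcount data weights = xnor_popcount_alt data weights := by
  obtain ⟨hx0, hxle⟩ := band_mask_bounds (Int.not (PySem.Int.bxor data weights))
    0xffffffffffffffff (by norm_num)
  have h64 : (2 : Nat) ^ 64 = 18446744073709551616 := by norm_num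
  exact xnor_popcount_core
    (PySem.Int.band (Int.not (PySem.Int.bxor data weights)) 0xffffffffffffffff).toNat
    (by omega)

-- ===== VERDICT (by name: the statement is the Claim_ definition above) =====
theorem xnor_popcount_spec : Claim_equal_xnor_popcount := by
  intro data weights _
  unfold Spec_xnor_popcount
  exact xnor_popcount_eq data weights
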